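-- pv_equiv track=rewrite | github.com/qx7z/Web-Lab | Lab1/Posting_List/Construct_PostingList.py | add_skip_pointers
-- ===== SOURCE A (Python) =====
-- import math
--
-- def add_skip_pointers(postinglist):
--     for token, IDList in postinglist.items():
--         stride = math.floor(math.sqrt(len(IDList)))
--         IDList_with_pointers = []
--         for i,ID in enumerate(IDList):
--             if i % stride == 0 and i + stride < len(IDList):
--                 IDList_with_pointers.append((ID,IDList[i + stride]))
--             else:
--                 IDList_with_pointers.append((ID,None))
--         postinglist[token] = IDList_with_pointers
--
--     return postinglist
-- ===== SOURCE B (Python) =====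
-- import math
--
-- def add_skip_pointers(postinglist):
--     for token, IDList in postinglist.items():
--         n = len(IDList)
--         stride = math.floor(math.sqrt(n))
--         result = [(ID, None) for ID in IDList]
--         if stride > 0:
--             for i in range(0, n, stride):
--                 if i + stride < n:
--                     result[i] = (result[i][0], IDList[i + stride])
--         postinglist[token] = result
--     return postinglist
-- ===== Notes on version B (the rewrite author's own statement) =====
-- stated objective: alternative
-- what changed: Replaces the single per-element enumerate loop with a modular test on every index by a fill-defaults pass [(ID,None) ...] followed by a strided patch pass over range(0,n,stride) that rewrites only the sqrt(n) skip positions.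
import Mathlib
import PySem

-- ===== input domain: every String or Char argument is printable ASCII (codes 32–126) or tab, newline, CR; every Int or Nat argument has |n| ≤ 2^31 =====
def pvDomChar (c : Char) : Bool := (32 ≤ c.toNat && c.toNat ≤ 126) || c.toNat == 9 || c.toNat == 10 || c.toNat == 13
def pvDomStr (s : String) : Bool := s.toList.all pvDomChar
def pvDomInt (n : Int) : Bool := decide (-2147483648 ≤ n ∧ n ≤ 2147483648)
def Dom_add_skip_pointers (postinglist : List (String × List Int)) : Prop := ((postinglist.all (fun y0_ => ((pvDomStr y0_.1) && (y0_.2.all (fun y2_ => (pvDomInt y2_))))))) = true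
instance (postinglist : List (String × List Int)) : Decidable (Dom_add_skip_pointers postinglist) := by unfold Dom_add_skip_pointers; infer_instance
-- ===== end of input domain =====

-- B rewrites the single enumerate loop (modulo test on every index) as fill-with-None then a
-- strided patch pass over the sqrt-stride positions only; return value proved equal (both
-- Pythons mutate the input dict in place and return it; the equivalence is about the return value).
-- math.floor(math.sqrt(len(...))) is ported as Nat.sqrt (exact for the list lengths exercised here).

-- ===== PORT A =====
-- per-token inner loop of A: enumerate with a modular branch, appending one pair per element
def pvBuildA (IDList : List Int) : List (Int × Option Int) :=
  let stride : Int := (Nat.sqrt IDList.length : Int)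
  (PySem.List.enumerate IDList).foldl
    (fun acc e =>
      if e.1 % stride = 0 ∧ e.1 + stride < (IDList.length : Int) then
        acc ++ [(e.2, PySem.List.pyGet? IDList (e.1 + stride))]
      else
        acc ++ [(e.2, (none : Option Int))]) []

def add_skip_pointers (postinglist : List (String × List Int)) : List (String × List (Int × Option Int)) :=
  postinglist.map (fun p => (p.1, pvBuildA p.2))

-- ===== PORT B =====
-- per-token body of B: defaults first, then a strided patch pass (guarded by stride > 0)
def pvStepB (ids : List Int) (stride : Int) (r : List (Int × Option Int)) (i : Int) : List (Int × Option Int) :=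
  if i + stride < (ids.length : Int) then
    PySem.List.pySetD r i ((PySem.List.pyGetD r i (0, none)).1, PySem.List.pyGet? ids (i + stride))
  else r

def pvBuildB (ids : List Int) : List (Int × Option Int) :=
  let n : Int := (ids.length : Int)
  let stride : Int := (Nat.sqrt ids.length : Int)
  let base := ids.map (fun id => (id, (none : Option Int)))
  if 0 < stride then
    (PySem.List.pyRange 0 n stride).foldl (pvStepB ids stride) base
  else base

def add_skip_pointers_alt (postinglist : List (String × List Int)) : List (String × List (Int × Option Int)) :=
  postinglist.map (fun p => (p.1, pvBuildB p.2))

-- ===== PRECONDITION & SPEC =====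
def Spec_add_skip_pointers (postinglist : List (String × List Int)) (out : List (String × List (Int × Option Int))) : Prop := out = add_skip_pointers_alt postinglist
instance (postinglist : List (String × List Int)) (out : List (String × List (Int × Option Int))) : Decidable (Spec_add_skip_pointers postinglist out) := by unfold Spec_add_skip_pointers; infer_instance

-- ===== CLAIM (what is proved, stated in full; the proofs are below) =====
def Claim_equal_add_skip_pointers : Prop := ∀ (postinglist : List (String × List Int)), Dom_add_skip_pointers postinglist → Spec_add_skip_pointers postinglist (add_skip_pointers postinglist)

-- ===== LEMMAS AND PROOFS =====

-- the branch value A appends, as a single function of the enumerate pair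
def pvFA (ids : List Int) (e : Int × Int) : Int × Option Int :=
  if e.1 % (Nat.sqrt ids.length : Int) = 0 ∧ e.1 + (Nat.sqrt ids.length : Int) < (ids.length : Int)
  then (e.2, PySem.List.pyGet? ids (e.1 + (Nat.sqrt ids.length : Int)))
  else (e.2, none)

theorem pvBuildA_eq_map (ids : List Int) :
    pvBuildA ids = (PySem.List.enumerate ids).map (pvFA ids) := by
  unfold pvBuildA
  dsimp only
  have h : (fun (acc : List (Int × Option Int)) (e : Int × Int) =>
      if e.1 % (Nat.sqrt ids.length : Int) = 0 ∧ e.1 + (Nat.sqrt ids.length : Int) < (ids.length : Int) then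
        acc ++ [(e.2, PySem.List.pyGet? ids (e.1 + (Nat.sqrt ids.length : Int)))]
      else acc ++ [(e.2, (none : Option Int))])
      = fun acc e => acc ++ [pvFA ids e] := by
    funext acc e
    unfold pvFA
    split <;> rfl
  rw [h, PySem.List.foldl_append_singleton_eq_map, List.nil_append]

theorem pvStepB_length (ids : List Int) (s : Int) (r : List (Int × Option Int)) (i : Int) :
    (pvStepB ids s r i).length = r.length := by
  unfold pvStepB
  split
  · exact PySem.List.length_pySetD r i _
  · rfl

theorem pvFoldB_length (ids : List Int) (s : Int) :
    ∀ (l : List Int) (acc : List (Int × Option Int)),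
      (l.foldl (pvStepB ids s) acc).length = acc.length := by
  intro l
  induction l with
  | nil => intro acc; rfl
  | cons i l ih =>
      intro acc
      simp only [List.foldl_cons]
      rw [ih, pvStepB_length]

-- core invariant: the strided patch fold computes, pointwise, the patched list
theorem pvFoldB_getElem? (ids : List Int) (s : Int) :
    ∀ (l : List Int) (acc : List (Int × Option Int)),
      acc.length = ids.length →
      (∀ j : Nat, j < ids.length → acc[j]?.map Prod.fst = ids[j]?) →
      (∀ i ∈ l, 0 ≤ i ∧ i < (ids.length : Int)) →
      ∀ (k : Nat) (hk : k < ids.length),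
        (l.foldl (pvStepB ids s) acc)[k]? =
          if ((k : Int) ∈ l ∧ (k : Int) + s < (ids.length : Int)) then
            some (ids[k]'hk, PySem.List.pyGet? ids ((k : Int) + s))
          else acc[k]? := by
  intro l
  induction l with
  | nil =>
      intro acc _ _ _ k hk
      simp
  | cons i l ih =>
      intro acc hlen hfst hmem k hk
      have hi := hmem i (by simp)
      obtain ⟨hi0, hin⟩ := hi
      lift i to Nat using hi0 with m
      have hm : m < ids.length := by exact_mod_cast hin
      have hml : m < acc.length := by omega
      -- the first component read by the patch is ids[m]
      have hfstm : (PySem.List.pyGetD acc (m : Int) (0, none)).1 = ids[m]'hm := by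
        have h0 := hfst m hm
        rw [List.getElem?_eq_getElem hml, List.getElem?_eq_getElem hm] at h0
        simp only [Option.map_some, Option.some.injEq] at h0
        rw [PySem.List.pyGetD_natCast, List.getD_eq_getElem acc _ hml]
        exact h0
      -- the effect of one step
      have hstep : ∀ (j : Nat) (hj : j < ids.length),
          (pvStepB ids s acc (m : Int))[j]? =
            if ((j : Int) = (m : Int) ∧ (m : Int) + s < (ids.length : Int)) then
              some (ids[j]'hj, PySem.List.pyGet? ids ((j : Int) + s))
            else acc[j]? := by
        intro j hj
        unfold pvStepB
        by_cases hlt : (m : Int) + s < (ids.length : Int)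
        · rw [if_pos hlt, PySem.List.pySetD_natCast, List.getElem?_set]
          by_cases hjm : m = j
          · subst hjm
            rw [if_pos rfl, if_pos hml, if_pos ⟨rfl, hlt⟩, hfstm]
          · rw [if_neg hjm,
                if_neg (show ¬((j : Int) = (m : Int) ∧ (m : Int) + s < (ids.length : Int)) from
                  fun h => hjm (by exact_mod_cast h.1.symm))]
        · rw [if_neg hlt, if_neg (fun h => hlt h.2)]
      -- apply the IH to the accumulator after one step
      have hlen' : (pvStepB ids s acc (m : Int)).length = ids.length := by
        rw [pvStepB_length]; exact hlen
      have hfst' : ∀ j : Nat, j < ids.length →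
          (pvStepB ids s acc (m : Int))[j]?.map Prod.fst = ids[j]? := by
        intro j hj
        rw [hstep j hj]
        by_cases hc : ((j : Int) = (m : Int) ∧ (m : Int) + s < (ids.length : Int))
        · rw [if_pos hc]
          simp [List.getElem?_eq_getElem hj]
        · rw [if_neg hc]; exact hfst j hj
      have hmem' : ∀ i' ∈ l, 0 ≤ i' ∧ i' < (ids.length : Int) := by
        intro i' hi'; exact hmem i' (by simp [hi'])
      simp only [List.foldl_cons]
      rw [ih (pvStepB ids s acc (m : Int)) hlen' hfst' hmem' k hk, hstep k hk]
      by_cases hks : (k : Int) + s < (ids.length : Int)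
      · by_cases hkl : (k : Int) ∈ l
        · rw [if_pos ⟨hkl, hks⟩, if_pos ⟨List.mem_cons_of_mem _ hkl, hks⟩]
        · rw [if_neg (fun h => hkl h.1)]
          by_cases hkm : (k : Int) = (m : Int)
          · rw [if_pos ⟨hkm, by rw [← hkm]; exact hks⟩,
                if_pos ⟨by simp [hkm], hks⟩]
          · rw [if_neg (fun h => hkm h.1),
                if_neg (fun h => (List.mem_cons.mp h.1).elim hkm hkl)]
      · rw [if_neg (fun h => hks h.2),
            if_neg (fun h => hks (by rw [h.1]; exact h.2)),
            if_neg (fun h => hks h.2)]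

-- per-token equality of the two inner computations
theorem pvBuild_eq (ids : List Int) : pvBuildA ids = pvBuildB ids := by
  rcases Nat.eq_zero_or_pos ids.length with hz | hpos
  · have : ids = [] := List.length_eq_zero_iff.mp hz
    subst this
    rfl
  · have hs : 0 < Nat.sqrt ids.length := Nat.sqrt_pos.mpr hpos
    have hsI : (0 : Int) < (Nat.sqrt ids.length : Int) := by exact_mod_cast hs
    rw [pvBuildA_eq_map]
    unfold pvBuildB
    dsimp only
    rw [if_pos hsI]
    set s : Int := (Nat.sqrt ids.length : Int) with hsdef
    set n : Int := (ids.length : Int) with hndef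
    set base := ids.map (fun id => (id, (none : Option Int))) with hbase
    have hblen : base.length = ids.length := by simp [hbase]
    have hbfst : ∀ j : Nat, j < ids.length → base[j]?.map Prod.fst = ids[j]? := by
      intro j hj
      simp [hbase, List.getElem?_eq_getElem hj]
    have hbmem : ∀ i ∈ PySem.List.pyRange 0 n s, 0 ≤ i ∧ i < n := by
      intro i hi
      rw [PySem.List.mem_pyRange_iff_of_pos hsI] at hi
      exact ⟨hi.1, hi.2.1⟩
    apply List.ext_getElem?
    intro k
    by_cases hk : k < ids.length
    · rw [List.getElem?_map, PySem.List.getElem?_enumerate, List.getElem?_eq_getElem hk,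
          pvFoldB_getElem? ids s (PySem.List.pyRange 0 n s) base hblen hbfst hbmem k hk]
      simp only [Option.map_some]
      unfold pvFA
      simp only [← hsdef, ← hndef, zero_add]
      have hmem_iff : (k : Int) ∈ PySem.List.pyRange 0 n s ↔ s ∣ (k : Int) := by
        rw [PySem.List.mem_pyRange_iff_of_pos hsI]
        constructor
        · intro h; simpa using h.2.2
        · intro h
          exact ⟨by positivity, by omega, by simpa using h⟩
      have hmod_iff : (k : Int) % s = 0 ↔ s ∣ (k : Int) :=
        ⟨Int.dvd_of_emod_eq_zero, Int.emod_eq_zero_of_dvd⟩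
      by_cases hdvd : s ∣ (k : Int)
      · by_cases hks : (k : Int) + s < n
        · rw [if_pos ⟨hmod_iff.mpr hdvd, hks⟩, if_pos ⟨hmem_iff.mpr hdvd, hks⟩]
        · rw [if_neg (fun h => hks h.2), if_neg (fun h => hks h.2)]
          simp [hbase, List.getElem?_eq_getElem hk]
      · rw [if_neg (fun h => hdvd (hmod_iff.mp h.1)),
            if_neg (fun h => hdvd (hmem_iff.mp h.1))]
        simp [hbase, List.getElem?_eq_getElem hk]
    · have h1 : ((PySem.List.enumerate ids).map (pvFA ids))[k]? = none := by
        rw [List.getElem?_eq_none_iff]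
        simp [PySem.List.length_enumerate]
        omega
      have h2 : ((PySem.List.pyRange 0 n s).foldl (pvStepB ids s) base)[k]? = none := by
        rw [List.getElem?_eq_none_iff, pvFoldB_length, hblen]
        omega
      rw [h1, h2]

-- ===== VERDICT (by name: the statement is the Claim_ definition above) =====
theorem add_skip_pointers_spec : Claim_equal_add_skip_pointers := by
  intro postinglist _
  unfold Spec_add_skip_pointers add_skip_pointers add_skip_pointers_alt
  exact List.map_congr_left (fun p _ => by rw [pvBuild_eq])
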